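-- pv_equiv track=rewrite | github.com/mozilla/REALISE-Performance | prediction_postprocessing_scripts/handpick_best_per_characteristic.py | loose_params_match
-- ===== SOURCE A (Python) =====
-- from typing import Optional, Dict, Any
--
-- def strip_irrelevant_params(d: Dict[str, Any]) -> Dict[str, Any]:
--     """Return a copy with keys removed that should not participate in matching."""
--     if not isinstance(d, dict):
--         return {}
--     dd = dict(d)
--     dd.pop("input", None)
--     dd.pop("output", None)
--     return dd
--
-- def loose_params_match(wanted: Dict[str, Any], candidate: Dict[str, Any]) -> bool:
--     """
--     Compare two parameter dictionaries loosely: all keys in `wanted` must be present in `candidate`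
--     and stringified values must match.
--     """
--     if not isinstance(wanted, dict) or not isinstance(candidate, dict):
--         return False
--
--     wanted_clean = strip_irrelevant_params(wanted)
--     candidate_clean = strip_irrelevant_params(candidate)
--
--     for k, v in wanted_clean.items():
--         if k not in candidate_clean:
--             return False
--         if str(candidate_clean[k]) != str(v):
--             return False
--     return True
-- ===== SOURCE B (Python) =====
-- def loose_params_match(wanted, candidate):
--     if not isinstance(wanted, dict) or not isinstance(candidate, dict):
--         return False
--     remaining = {k: str(v) for k, v in wanted.items()}
--     remaining.pop("input", None)
--     remaining.pop("output", None)
--     for k, v in candidate.items():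
--         if k not in ("input", "output") and remaining.get(k) == str(v):
--             remaining.pop(k)
--     return not remaining
-- ===== Notes on version B (the rewrite author's own statement) =====
-- stated objective: alternative
-- what changed: Inverts the traversal: instead of A's loop over wanted keys with lookups into candidate, B builds a shrinking dict of the stringified wanted pairs, makes one pass over candidate consuming each pair it satisfies, and returns whether the dict emptied.
import Mathlib
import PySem

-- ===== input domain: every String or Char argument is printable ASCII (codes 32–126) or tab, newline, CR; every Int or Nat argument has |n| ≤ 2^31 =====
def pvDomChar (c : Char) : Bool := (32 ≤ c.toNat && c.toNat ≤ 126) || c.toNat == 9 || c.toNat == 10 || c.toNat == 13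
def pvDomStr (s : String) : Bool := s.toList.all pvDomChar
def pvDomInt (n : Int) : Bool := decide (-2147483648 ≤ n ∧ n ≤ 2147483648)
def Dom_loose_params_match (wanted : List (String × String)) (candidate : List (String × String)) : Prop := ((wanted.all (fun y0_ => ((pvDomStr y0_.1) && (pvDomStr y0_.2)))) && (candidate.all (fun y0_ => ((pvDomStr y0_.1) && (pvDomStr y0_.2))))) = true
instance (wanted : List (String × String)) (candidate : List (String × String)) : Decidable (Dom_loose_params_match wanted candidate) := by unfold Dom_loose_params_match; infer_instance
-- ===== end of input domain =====

-- B inverts the traversal: it builds a shrinking dict of the wanted pairs, makes one pass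
-- over candidate consuming each pair it satisfies, and returns whether the dict emptied
-- (A instead loops over wanted with lookups into candidate).

-- ===== PORT A =====
-- strip_irrelevant_params: dd = dict(d); dd.pop("input", None); dd.pop("output", None)
-- (the isinstance guard is always True here: the argument is a dict by type)
def strip_irrelevant_params (d : List (String × String)) : PySem.Dict String String :=
  ((PySem.Dict.ofList d).erase "input").erase "output"

-- the for-loop over wanted_clean.items()
def looseLoopA : List (String × String) → PySem.Dict String String → Bool
  | [], _ => true
  | (k, v) :: rest, cc =>
    if !cc.contains k then false
    else if cc.getD k "" != v then false
    else looseLoopA rest cc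

def loose_params_match (wanted : List (String × String)) (candidate : List (String × String)) : Bool :=
  looseLoopA (strip_irrelevant_params wanted).items (strip_irrelevant_params candidate)

-- ===== PORT B =====
-- remaining = {k: str(v) for k, v in wanted.items()}; remaining.pop("input"/"output", None)
-- (str(v) = v: the values are already str)
def remainingInit (wanted : List (String × String)) : PySem.Dict String String :=
  ((PySem.Dict.ofList wanted).erase "input").erase "output"

-- for k, v in candidate.items(): if k not in ("input","output") and remaining.get(k) == str(v): remaining.pop(k)
def consumeLoop (candidate : List (String × String)) (remaining : PySem.Dict String String) :
    PySem.Dict String String :=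
  candidate.foldl
    (fun r p =>
      if (p.1 ≠ "input" ∧ p.1 ≠ "output") ∧ r.get? p.1 = some p.2 then r.erase p.1 else r)
    remaining

def loose_params_match_alt (wanted : List (String × String)) (candidate : List (String × String)) : Bool :=
  (consumeLoop candidate (remainingInit wanted)).items.isEmpty

-- ===== PRECONDITION & SPEC =====
-- Pre_ restricts to association lists with pairwise-distinct keys: the Python arguments are
-- dicts, which cannot carry duplicate keys, so duplicate-key lists represent no Python input.
def Pre_loose_params_match (wanted : List (String × String)) (candidate : List (String × String)) : Prop :=
  (wanted.map Prod.fst).Nodup ∧ (candidate.map Prod.fst).Nodup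
instance (wanted : List (String × String)) (candidate : List (String × String)) : Decidable (Pre_loose_params_match wanted candidate) := by unfold Pre_loose_params_match; infer_instance

def pvWitness_loose_params_match : (List (String × String)) × (List (String × String)) :=
  ([("a", "1"), ("input", "z")], [("a", "1"), ("b", "2")])

def Spec_loose_params_match (wanted : List (String × String)) (candidate : List (String × String)) (out : Bool) : Prop := out = loose_params_match_alt wanted candidate
instance (wanted : List (String × String)) (candidate : List (String × String)) (out : Bool) : Decidable (Spec_loose_params_match wanted candidate out) := by unfold Spec_loose_params_match; infer_instance

-- ===== CLAIM (what is proved, stated in full; the proofs are below) =====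
def Claim_equal_loose_params_match : Prop := ∀ (wanted : List (String × String)) (candidate : List (String × String)), Dom_loose_params_match wanted candidate → Pre_loose_params_match wanted candidate → Spec_loose_params_match wanted candidate (loose_params_match wanted candidate)

-- ===== LEMMAS AND PROOFS =====

def pvKeep (p : String × String) : Bool := !(p.1 == "input" || p.1 == "output")

-- the cleaned dict, on nodup-key input, is just the filtered list
theorem strip_items (d : List (String × String)) (h : (d.map Prod.fst).Nodup) :
    (strip_irrelevant_params d).items = d.filter pvKeep := by
  have hof : (PySem.Dict.ofList d).items = d := by
    have := PySem.Dict.items_foldl_insert_fresh (d := (PySem.Dict.empty : PySem.Dict String String))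
      (l := d) (k := Prod.fst) (v := Prod.snd)
      (by intro a _; simp [PySem.Dict.contains, PySem.Dict.empty]) h
    simpa [PySem.Dict.ofList, PySem.Dict.update, PySem.Dict.empty] using this
  simp [strip_irrelevant_params, PySem.Dict.erase, hof, List.filter_filter]
  congr 1
  funext a
  simp [pvKeep, Bool.and_comm]

theorem keys_filter_nodup (d : List (String × String)) (h : (d.map Prod.fst).Nodup) :
    ((d.filter pvKeep).map Prod.fst).Nodup :=
  (h.sublist (List.Sublist.map Prod.fst List.filter_sublist))

-- A's loop is the items-subset test, on a candidate dict with nodup keys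
theorem loopA_eq_all (L : List (String × String)) (cc : PySem.Dict String String)
    (hnd : cc.keys.Nodup) :
    looseLoopA L cc = L.all (fun p => cc.items.contains p) := by
  induction L with
  | nil => rfl
  | cons p rest ih =>
    obtain ⟨k, v⟩ := p
    have hhead : (cc.contains k && (cc.getD k "" == v)) = cc.items.contains (k, v) := by
      cases hg : cc.get? k with
      | none =>
        have hc : cc.contains k = false := by
          rw [PySem.Dict.contains_eq_isSome_get?, hg]; rfl
        have hm : (k, v) ∉ cc.items := by
          intro hmem
          rw [PySem.Dict.get?_of_mem_items _ hmem hnd] at hg; cases hg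
        simp [hc, hm]
      | some w =>
        have hc : cc.contains k = true := by
          rw [PySem.Dict.contains_eq_isSome_get?, hg]; rfl
        have hgd : cc.getD k "" = w := PySem.Dict.getD_of_get?_eq_some cc "" hg
        by_cases hwv : w = v
        · subst hwv
          have hm : (k, w) ∈ cc.items := PySem.Dict.mem_items_of_get?_eq_some _ hg
          simp [hc, hgd, hm]
        · have hm : (k, v) ∉ cc.items := by
            intro hmem
            rw [PySem.Dict.get?_of_mem_items _ hmem hnd] at hg
            exact hwv (Option.some.inj hg).symm
          simp [hc, hgd, hwv, hm]
    simp only [looseLoopA, List.all_cons, ← hhead]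
    cases h1 : cc.contains k with
    | false => simp
    | true =>
      cases h2 : (cc.getD k "" == v) with
      | false => simp [bne, h2]
      | true => simp [bne, h2, ih]

-- items of erase is a filter on items
theorem items_erase (d : PySem.Dict String String) (k : String) :
    (d.erase k).items = d.items.filter (fun p => !(p.1 == k)) := by
  simp [PySem.Dict.erase]

theorem keys_erase_nodup (d : PySem.Dict String String) (k : String)
    (h : d.keys.Nodup) : (d.erase k).keys.Nodup := by
  have : (d.erase k).items.Sublist d.items := by
    rw [items_erase]; exact List.filter_sublist
  exact h.sublist (List.Sublist.map Prod.fst this)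

-- B's consuming pass: the surviving items are exactly those not matched by a cleaned candidate pair
theorem consume_items (C : List (String × String)) (R : PySem.Dict String String)
    (hR : R.keys.Nodup) :
    (consumeLoop C R).items
      = R.items.filter (fun p => !((C.filter pvKeep).contains p)) := by
  induction C generalizing R with
  | nil => simp [consumeLoop]
  | cons q rest ih =>
    obtain ⟨k, v⟩ := q
    by_cases hk : k = "input" ∨ k = "output"
    · have hkeep : pvKeep (k, v) = false := by
        rcases hk with h1 | h1 <;> simp [pvKeep, h1]
      have hfc : ((k, v) :: rest).filter pvKeep = rest.filter pvKeep := by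
        simp [hkeep]
      have hguard : ¬ ((k ≠ "input" ∧ k ≠ "output") ∧ R.get? k = some v) := by
        rintro ⟨⟨h1, h2⟩, _⟩; rcases hk with h3 | h3 <;> [exact h1 h3; exact h2 h3]
      have ih' := ih R hR
      simp only [consumeLoop] at ih' ⊢
      rw [List.foldl_cons, if_neg hguard, hfc, ih']
    · push Not at hk
      have hkeep : pvKeep (k, v) = true := by simp [pvKeep, hk.1, hk.2]
      have hfc : ((k, v) :: rest).filter pvKeep = (k, v) :: rest.filter pvKeep := by
        simp [hkeep]
      rw [hfc]
      by_cases hget : R.get? k = some v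
      · have hguard : ((k ≠ "input" ∧ k ≠ "output") ∧ R.get? k = some v) := ⟨hk, hget⟩
        have ih' := ih (R.erase k) (keys_erase_nodup R k hR)
        simp only [consumeLoop] at ih' ⊢
        rw [List.foldl_cons, if_pos hguard, ih', items_erase, List.filter_filter]
        apply List.filter_congr
        intro p hp
        by_cases hpk : p.1 = k
        · have : p = (k, v) := by
            have := PySem.Dict.get?_of_mem_items _ hp hR
            rw [hpk, hget] at this
            obtain ⟨p1, p2⟩ := p
            simp_all
          simp [this]
        · have : ¬ p = (k, v) := by
            intro he; exact hpk (by rw [he])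
          simp [hpk, this]
      · have hguard : ¬ ((k ≠ "input" ∧ k ≠ "output") ∧ R.get? k = some v) := by
          rintro ⟨_, h2⟩; exact hget h2
        have ih' := ih R hR
        simp only [consumeLoop] at ih' ⊢
        rw [List.foldl_cons, if_neg hguard, ih']
        apply List.filter_congr
        intro p hp
        have : ¬ p = (k, v) := by
          intro he
          apply hget
          have := PySem.Dict.get?_of_mem_items _ hp hR
          rw [he] at this; exact this
        simp [this]

-- the same items characterisation for B's initial dict (definitionally the same cleaning)
theorem remaining_items (d : List (String × String)) (h : (d.map Prod.fst).Nodup) :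
    (remainingInit d).items = d.filter pvKeep := strip_items d h

-- emptiness of the complement-filter is the universal membership test
theorem filter_not_isEmpty_eq_all (l : List (String × String))
    (f : (String × String) → Bool) :
    (l.filter (fun p => !(f p))).isEmpty = l.all f := by
  induction l with
  | nil => rfl
  | cons x xs ih =>
    cases h : f x <;> simp [h, ih]

-- ===== VERDICT (by name: the statement is the Claim_ definition above) =====
theorem loose_params_match_spec : Claim_equal_loose_params_match := by
  intro wanted candidate _ hpre
  obtain ⟨hw, hc⟩ := hpre
  unfold Spec_loose_params_match loose_params_match loose_params_match_alt
  have hndW : (remainingInit wanted).keys.Nodup := by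
    show ((remainingInit wanted).items.map Prod.fst).Nodup
    rw [remaining_items wanted hw]
    exact keys_filter_nodup wanted hw
  have hndC : (strip_irrelevant_params candidate).keys.Nodup := by
    show ((strip_irrelevant_params candidate).items.map Prod.fst).Nodup
    rw [strip_items candidate hc]
    exact keys_filter_nodup candidate hc
  rw [consume_items candidate _ hndW, remaining_items wanted hw,
    filter_not_isEmpty_eq_all, loopA_eq_all _ _ hndC, strip_items wanted hw,
    strip_items candidate hc]
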